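-- pv_equiv track=rewrite | github.com/twpca/toi-primary-2024 | generator/steps_3.py | generate_fixed_k
-- ===== SOURCE A (Python) =====
-- def generate_fixed_k(k: int, limit_e: int):
--     step = set()
--
--     cur = 0
--     l, r = 1, k
--     while l < r:
--         cur += l
--         step.add(cur)
--         cur += r
--         step.add(cur)
--         r -= 1
--         l += 1
--
--     hole = []
--     for i in range(1, cur):
--         if i not in step:
--             hole.append(i)
--
--     if (cur - len(hole)) * len(step) > limit_e:
--         return None
--
--     return cur, step, hole
-- ===== SOURCE B (Python) =====
-- def generate_fixed_k(k: int, limit_e: int):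
--     # Collect the breakpoints in strictly increasing order as they are produced,
--     # then build the complement by filling the gaps between consecutive breakpoints.
--     steps = []
--     cur = 0
--     l, r = 1, k
--     while l < r:
--         steps.append(cur + l)
--         steps.append(cur + l + r)
--         cur += l + r
--         l += 1
--         r -= 1
--
--     hole = []
--     lo = 1
--     for s in steps:
--         hole.extend(range(lo, s))
--         lo = s + 1
--     hole.extend(range(lo, cur))
--
--     if (cur - len(hole)) * len(steps) > limit_e:
--         return None
--     return cur, set(steps), hole
-- ===== Notes on version B (the rewrite author's own statement) =====
-- stated objective: alternative
-- what changed: B records the partial sums as an already strictly increasing list while the loop runs and builds the hole list by interval-filling the gaps between consecutive breakpoints, instead of scanning every integer in [1, cur) and testing set membership.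
import Mathlib
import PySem

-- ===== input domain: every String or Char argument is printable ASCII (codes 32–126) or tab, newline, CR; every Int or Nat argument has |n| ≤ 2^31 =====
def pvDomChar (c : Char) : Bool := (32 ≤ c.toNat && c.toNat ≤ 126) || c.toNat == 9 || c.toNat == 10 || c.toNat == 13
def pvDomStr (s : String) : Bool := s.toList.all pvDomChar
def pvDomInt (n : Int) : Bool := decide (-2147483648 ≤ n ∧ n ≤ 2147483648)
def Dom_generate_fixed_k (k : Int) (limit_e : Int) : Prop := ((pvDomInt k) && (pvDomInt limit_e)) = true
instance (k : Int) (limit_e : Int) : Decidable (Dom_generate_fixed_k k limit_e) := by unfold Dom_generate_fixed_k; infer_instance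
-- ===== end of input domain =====

-- B collects the breakpoints in the increasing order they are produced and builds the
-- complement by interval-filling between consecutive breakpoints, instead of scanning
-- every integer in [1, cur) and testing set membership (objective: alternative).

-- ===== PORT A =====
-- the while loop: cur += l; step.add(cur); cur += r; step.add(cur); r -= 1; l += 1
def pvALoop (cur : Int) (step : PySem.Set Int) (l r : Int) : Int × PySem.Set Int :=
  if l < r then
    pvALoop (cur + l + r) ((step.add (cur + l)).add (cur + l + r)) (l + 1) (r - 1)
  else (cur, step)
termination_by (r - l).toNat
decreasing_by omega

def generate_fixed_k (k : Int) (limit_e : Int) : Option (Int × List Int × List Int) :=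
  let p := pvALoop 0 PySem.Set.empty 1 k
  let cur := p.1
  let step := p.2
  let hole := (PySem.List.pyRange 1 cur 1).foldl
    (fun acc i => if !(step.contains i) then acc ++ [i] else acc) []
  if (cur - (hole.length : Int)) * PySem.Set.len step > limit_e then none
  else some (cur, step, hole)

-- ===== PORT B =====
-- the while loop: steps.append(cur+l); steps.append(cur+l+r); cur += l+r; l += 1; r -= 1
def pvBLoop (cur l r : Int) (steps : List Int) : Int × List Int :=
  if l < r then
    pvBLoop (cur + l + r) (l + 1) (r - 1) (steps ++ [cur + l, cur + l + r])
  else (cur, steps)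
termination_by (r - l).toNat
decreasing_by omega

def generate_fixed_k_alt (k : Int) (limit_e : Int) : Option (Int × List Int × List Int) :=
  let p := pvBLoop 0 1 k []
  let cur := p.1
  let steps := p.2
  -- for s in steps: hole.extend(range(lo, s)); lo = s + 1
  let q := steps.foldl (fun (acc : List Int × Int) s =>
    (acc.1 ++ PySem.List.pyRange acc.2 s 1, s + 1)) ([], 1)
  let hole := q.1 ++ PySem.List.pyRange q.2 cur 1
  if (cur - (hole.length : Int)) * (steps.length : Int) > limit_e then none
  else some (cur, PySem.Set.ofList steps, hole)

-- ===== PRECONDITION & SPEC =====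
def Spec_generate_fixed_k (k : Int) (limit_e : Int) (out : Option (Int × List Int × List Int)) : Prop := out = generate_fixed_k_alt k limit_e
instance (k : Int) (limit_e : Int) (out : Option (Int × List Int × List Int)) : Decidable (Spec_generate_fixed_k k limit_e out) := by unfold Spec_generate_fixed_k; infer_instance

-- ===== CLAIM (what is proved, stated in full; the proofs are below) =====
def Claim_equal_generate_fixed_k : Prop := ∀ (k : Int) (limit_e : Int), Dom_generate_fixed_k k limit_e → Spec_generate_fixed_k k limit_e (generate_fixed_k k limit_e)

-- ===== LEMMAS AND PROOFS =====

-- A's loop on set(steps) is B's loop, with the final list viewed as a set.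
theorem pvLoop_corr (n : Nat) : ∀ (cur l r : Int) (steps : List Int), (r - l).toNat = n →
    pvALoop cur (PySem.Set.ofList steps) l r =
      ((pvBLoop cur l r steps).1, PySem.Set.ofList (pvBLoop cur l r steps).2) := by
  induction n using Nat.strong_induction_on with
  | _ n ih =>
    intro cur l r steps hn
    rw [pvALoop, pvBLoop]
    by_cases h : l < r
    · simp only [h, if_pos]
      have hst : ((PySem.Set.ofList steps).add (cur + l)).add (cur + l + r)
          = PySem.Set.ofList (steps ++ [cur + l, cur + l + r]) := by
        have : steps ++ [cur + l, cur + l + r] = (steps ++ [cur + l]) ++ [cur + l + r] := by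
          simp
        rw [this, PySem.Set.ofList_append_singleton, PySem.Set.ofList_append_singleton]
      rw [hst]
      exact ih ((r - 1) - (l + 1)).toNat (by omega) _ _ _ _ rfl
    · simp [h]

-- invariant of B's loop: the collected breakpoints are strictly increasing,
-- at least 1, and at most the final running sum.
theorem pvLoop_inv (n : Nat) : ∀ (cur l r : Int) (steps : List Int), (r - l).toNat = n →
    0 ≤ cur → 1 ≤ l → steps.Pairwise (· < ·) → (∀ x ∈ steps, 1 ≤ x ∧ x ≤ cur) →
    0 ≤ (pvBLoop cur l r steps).1 ∧ (pvBLoop cur l r steps).2.Pairwise (· < ·) ∧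
      (∀ x ∈ (pvBLoop cur l r steps).2, 1 ≤ x ∧ x ≤ (pvBLoop cur l r steps).1) := by
  induction n using Nat.strong_induction_on with
  | _ n ih =>
    intro cur l r steps hn hcur hl hpw hmem
    rw [pvBLoop]
    by_cases h : l < r
    · simp only [h, if_pos]
      refine ih ((r - 1) - (l + 1)).toNat (by omega) _ _ _ _ rfl (by omega) (by omega) ?_ ?_
      · rw [List.pairwise_append]
        refine ⟨hpw, ?_, ?_⟩
        · simp; omega
        · intro x hx y hy
          have := (hmem x hx).2
          simp at hy
          rcases hy with rfl | rfl <;> omega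
      · intro x hx
        simp at hx
        rcases hx with hx | rfl | rfl
        · have := hmem x hx; omega
        · omega
        · omega
    · simp only [h, if_neg, not_false_iff]
      exact ⟨hcur, hpw, hmem⟩

-- the recursive form of B's interval-filling
def pvFill (lo c : Int) (steps : List Int) : List Int :=
  match steps with
  | [] => PySem.List.pyRange lo c 1
  | s :: t => PySem.List.pyRange lo s 1 ++ pvFill (s + 1) c t

theorem pvFold_fill (steps : List Int) : ∀ (acc : List Int) (lo c : Int),
    (steps.foldl (fun (p : List Int × Int) s =>
        (p.1 ++ PySem.List.pyRange p.2 s 1, s + 1)) (acc, lo)).1 ++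
      PySem.List.pyRange (steps.foldl (fun (p : List Int × Int) s =>
        (p.1 ++ PySem.List.pyRange p.2 s 1, s + 1)) (acc, lo)).2 c 1
    = acc ++ pvFill lo c steps := by
  induction steps with
  | nil => intro acc lo c; simp [pvFill]
  | cons s t ih =>
    intro acc lo c
    simp only [List.foldl_cons, pvFill]
    rw [ih, List.append_assoc]

theorem pvFilter_fill (steps : List Int) : ∀ (lo c : Int),
    steps.Pairwise (· < ·) → (∀ x ∈ steps, lo ≤ x ∧ x ≤ c) →
    (PySem.List.pyRange lo c 1).filter (fun i => !decide (i ∈ steps)) = pvFill lo c steps := by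
  induction steps with
  | nil => intro lo c _ _; simp [pvFill]
  | cons s t ih =>
    intro lo c hpw hmem
    have hs : lo ≤ s ∧ s ≤ c := hmem s (by simp)
    have hlt : ∀ x ∈ t, s < x := fun x hx => (List.pairwise_cons.mp hpw).1 x hx
    rw [PySem.List.pyRange_one_append lo s c hs.1 hs.2]
    rw [List.filter_append, pvFill]
    have h1 : (PySem.List.pyRange lo s 1).filter (fun i => !decide (i ∈ s :: t))
        = PySem.List.pyRange lo s 1 := by
      apply List.filter_eq_self.mpr
      intro x hx
      have hxr := PySem.List.mem_pyRange_one.mp hx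
      have hns : x ∉ s :: t := by
        simp only [List.mem_cons]
        rintro (rfl | hxt)
        · omega
        · have := hlt x hxt; omega
      simp [hns]
    rw [h1]
    congr 1
    rcases lt_or_eq_of_le hs.2 with hsc | hsc
    · rw [PySem.List.pyRange_one_cons hsc]
      rw [List.filter_cons_of_neg (by simp)]
      have hcongr : (PySem.List.pyRange (s + 1) c 1).filter (fun i => !decide (i ∈ s :: t))
          = (PySem.List.pyRange (s + 1) c 1).filter (fun i => !decide (i ∈ t)) := by
        apply List.filter_congr
        intro x hx
        have hxr := PySem.List.mem_pyRange_one.mp hx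
        have hne : x ≠ s := by omega
        simp [List.mem_cons, hne]
      rw [hcongr]
      exact ih (s + 1) c (List.pairwise_cons.mp hpw).2
        (fun x hx => ⟨by have := hlt x hx; omega, (hmem x (by simp [hx])).2⟩)
    · -- s = c : the remaining range is empty and so is t
      subst hsc
      have ht : t = [] := by
        cases t with
        | nil => rfl
        | cons y ys =>
          have h1 := hlt y (by simp)
          have h2 := (hmem y (by simp)).2
          omega
      subst ht
      rw [PySem.List.pyRange_one_eq_nil (le_refl s)]
      simp [pvFill, PySem.List.pyRange_one_eq_nil (by omega : s ≤ s + 1)]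

theorem pairwise_lt_nodup (l : List Int) (h : l.Pairwise (· < ·)) : l.Nodup :=
  h.imp (fun hlt => ne_of_lt hlt)

-- ===== VERDICT (by name: the statement is the Claim_ definition above) =====
theorem generate_fixed_k_spec : Claim_equal_generate_fixed_k := by
  intro k limit_e _
  unfold Spec_generate_fixed_k generate_fixed_k generate_fixed_k_alt
  have hcorr := pvLoop_corr (k - 1).toNat 0 1 k [] rfl
  have hempty : PySem.Set.ofList ([] : List Int) = PySem.Set.empty := rfl
  rw [hempty] at hcorr
  have hinv := pvLoop_inv (k - 1).toNat 0 1 k [] rfl (le_refl 0) (le_refl 1)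
    (List.Pairwise.nil) (by simp)
  obtain ⟨hc0, hpw, hmem⟩ := hinv
  set q := pvBLoop 0 1 k [] with hq
  have hnodup : q.2.Nodup := pairwise_lt_nodup _ hpw
  have hofl : PySem.Set.ofList q.2 = q.2 := PySem.Set.ofList_eq_self_of_nodup _ hnodup
  simp only [hcorr, hofl]
  -- A's hole loop is a filter
  have hAhole : (PySem.List.pyRange 1 q.1 1).foldl
      (fun acc i => if !(PySem.Set.contains q.2 i) then acc ++ [i] else acc) ([] : List Int)
      = (PySem.List.pyRange 1 q.1 1).filter (fun i => !decide (i ∈ q.2)) := by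
    have := PySem.List.foldl_append_if (fun i => !(PySem.Set.contains q.2 i)) (fun i => i)
      (PySem.List.pyRange 1 q.1 1) []
    simp only [List.map_id', List.nil_append] at this
    rw [this]
    congr 1
    funext i
    rw [PySem.Set.contains_eq_listContains, List.contains_eq_mem]
  rw [hAhole]
  -- B's hole loop is pvFill
  have hBhole := pvFold_fill q.2 [] 1 q.1
  simp only [List.nil_append] at hBhole
  rw [hBhole]
  rw [pvFilter_fill q.2 1 q.1 hpw hmem]
  -- lengths: |set(steps)| = |steps| since steps is Nodup (PySem.Set.len s = s.length)
  have hlen : PySem.Set.len q.2 = (q.2.length : Int) := by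
    simp [PySem.Set.len]
  rw [hlen]
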